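-- pv_equiv track=rewrite | github.com/wingpom/CP164-Datastructures | Assignments/A6.py | select_upper2
-- ===== SOURCE A (Python) =====
-- def select_upper2(text,letter):
--     """
--     -------------------------------------------------------
--     Description:
--         replace every occurrence of 'letter' in 'text' with upper case
--         Function does not change text, returns the updated version of text
--         Uses recursion
--     Assert: text is a string
--             letter is a string containing a single lower case alphabet
--     Use: modified_text = select_upper2(text,letter)
--     -------------------------------------------------------
--     Parameters:
--         text: a string of arbitrary lenght (str)
--         letter: a single lower case character (str)
--     Returns:
--         modified_text: modified version of the text (str)
--     -------------------------------------------------------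
--     """
--     assert isinstance(text, str), 'invalid text'
--     assert(isinstance(letter, str) and letter.islower()), 'invalid letter'
--     modified_text = ''
--     if text == '':
--         return ''
--     if text[0] == letter:
--         modified_text = text[0].upper() + select_upper2(text[1:], letter)
--     else:
--         modified_text = text[0] + select_upper2(text[1:], letter)
--     return modified_text
-- ===== SOURCE B (Python) =====
-- def select_upper2(text, letter):
--     assert isinstance(text, str), 'invalid text'
--     assert(isinstance(letter, str) and letter.islower()), 'invalid letter'
--     modified_text = ''
--     for ch in text:
--         if ch == letter:
--             modified_text += ch.upper()
--         else:
--             modified_text += ch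
--     return modified_text
-- ===== Notes on version B (the rewrite author's own statement) =====
-- stated objective: simpler
-- what changed: Replaces the self-recursion (one call frame per character, rebuilding the tail each step) with a single explicit forward loop over the characters accumulating the result string.
import Mathlib
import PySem

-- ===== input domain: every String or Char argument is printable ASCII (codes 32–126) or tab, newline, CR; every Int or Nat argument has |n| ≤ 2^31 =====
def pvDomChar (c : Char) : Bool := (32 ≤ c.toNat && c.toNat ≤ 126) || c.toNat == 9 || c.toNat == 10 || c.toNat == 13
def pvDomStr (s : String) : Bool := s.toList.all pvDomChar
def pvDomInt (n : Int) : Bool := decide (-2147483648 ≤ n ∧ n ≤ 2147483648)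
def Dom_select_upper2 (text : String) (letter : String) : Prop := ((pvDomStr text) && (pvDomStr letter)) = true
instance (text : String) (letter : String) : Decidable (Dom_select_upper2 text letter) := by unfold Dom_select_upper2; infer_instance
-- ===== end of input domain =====

-- B replaces A's per-character self-recursion with one explicit forward loop over the
-- characters accumulating the result (objective: simpler).

-- ===== PORT A =====
-- A's recursion over text: empty → '', else uppercase head if it equals letter, recurse on the tail.
def selUpA (cs : List Char) (l : List Char) : List Char :=
  match cs with
  | [] => []
  | c :: rest =>
      if [c] = l then PySem.Chars.upper [c] ++ selUpA rest l
      else c :: selUpA rest l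

def select_upper2 (text : String) (letter : String) : String :=
  String.mk (selUpA text.toList letter.toList)

-- ===== PORT B =====
-- B's single forward loop with a string accumulator.
def select_upper2_alt (text : String) (letter : String) : String :=
  String.mk (text.toList.foldl
    (fun acc c => acc ++ (if [c] = letter.toList then PySem.Chars.upper [c] else [c])) [])

-- ===== PRECONDITION & SPEC =====
-- Pre_ excludes exactly the inputs where the assert 'letter.islower()' fails: both A and B
-- raise AssertionError there (on the ASCII domain, islower = at least one lowercase letter
-- and no uppercase letter).
def Pre_select_upper2 (text : String) (letter : String) : Prop :=
  (letter.toList.any (fun c => PySem.Chars.islower c)) = true ∧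
  (letter.toList.all (fun c => !PySem.Chars.isupper c)) = true
instance (text : String) (letter : String) : Decidable (Pre_select_upper2 text letter) := by
  unfold Pre_select_upper2; infer_instance

def pvWitness_select_upper2 : String × String := ("banana", "a")

def Spec_select_upper2 (text : String) (letter : String) (out : String) : Prop := out = select_upper2_alt text letter
instance (text : String) (letter : String) (out : String) : Decidable (Spec_select_upper2 text letter out) := by unfold Spec_select_upper2; infer_instance

-- ===== CLAIM (what is proved, stated in full; the proofs are below) =====
def Claim_equal_select_upper2 : Prop := ∀ (text : String) (letter : String), Dom_select_upper2 text letter → Pre_select_upper2 text letter → Spec_select_upper2 text letter (select_upper2 text letter)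

-- ===== LEMMAS AND PROOFS =====
theorem selUpA_eq_flatMap (cs l : List Char) :
    selUpA cs l = cs.flatMap (fun c => if [c] = l then PySem.Chars.upper [c] else [c]) := by
  induction cs with
  | nil => simp [selUpA]
  | cons c rest ih =>
      simp only [selUpA, List.flatMap_cons, ih]
      split_ifs <;> simp

-- ===== VERDICT (by name: the statement is the Claim_ definition above) =====
theorem select_upper2_spec : Claim_equal_select_upper2 := by
  intro text letter _ _
  unfold Spec_select_upper2 select_upper2 select_upper2_alt
  rw [PySem.List.foldl_append_eq_flatMap, List.nil_append, selUpA_eq_flatMap]
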